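-- pv_equiv track=rewrite | github.com/Anro128/disasm2vec | src/disasm2vec/disassembler/objdump.py | _filter_builtin_functions
-- ===== SOURCE A (Python) =====
-- def _filter_builtin_functions(asm: str) -> str:
--     """
--     Remove builtin / PLT / runtime functions from objdump output.
--     """
--     filtered_lines = []
--
--     skip = False
--     for line in asm.splitlines():
--         if "<" in line and ">" in line and line.strip().endswith(":"):
--             name = line.split("<")[1].split(">")[0]
--
--             if (
--                 name.endswith("@plt")
--                 or name.startswith("_start")
--                 or name.startswith("frame_dummy")
--                 or name.startswith("register_tm_clones")
--                 or name.startswith("deregister_tm_clones")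
--                 or name.startswith("__")
--             ):
--                 skip = True
--                 continue
--             else:
--                 skip = False
--
--         if not skip:
--             filtered_lines.append(line)
--
--     return "\n".join(filtered_lines)
-- ===== SOURCE B (Python) =====
-- def _is_header(line):
--     return "<" in line and ">" in line and line.strip().endswith(":")
--
--
-- def _name_of(header):
--     return header.split("<")[1].split(">")[0]
--
--
-- def _is_builtin(name):
--     return name.endswith("@plt") or name.startswith(
--         ("_start", "frame_dummy", "register_tm_clones", "deregister_tm_clones", "__")
--     )
--
--
-- def _filter_builtin_functions(asm: str) -> str:
--     """Group-then-filter: partition lines into header blocks, drop builtin blocks."""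
--     blocks = [(None, [])]  # (header-or-None, body lines); first block = pre-header lines
--     for line in asm.splitlines():
--         if _is_header(line):
--             blocks.append((line, []))
--         else:
--             blocks[-1][1].append(line)
--
--     out = []
--     for header, body in blocks:
--         if header is None or not _is_builtin(_name_of(header)):
--             if header is not None:
--                 out.append(header)
--             out.extend(body)
--     return "\n".join(out)
-- ===== Notes on version B (the rewrite author's own statement) =====
-- stated objective: alternative
-- what changed: Replaces the running skip-flag scan with a group-then-filter pipeline: lines are first partitioned into a pre-header block plus one block per function header, then whole blocks whose header names a builtin/PLT function are dropped and the rest joined.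
import Mathlib
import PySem

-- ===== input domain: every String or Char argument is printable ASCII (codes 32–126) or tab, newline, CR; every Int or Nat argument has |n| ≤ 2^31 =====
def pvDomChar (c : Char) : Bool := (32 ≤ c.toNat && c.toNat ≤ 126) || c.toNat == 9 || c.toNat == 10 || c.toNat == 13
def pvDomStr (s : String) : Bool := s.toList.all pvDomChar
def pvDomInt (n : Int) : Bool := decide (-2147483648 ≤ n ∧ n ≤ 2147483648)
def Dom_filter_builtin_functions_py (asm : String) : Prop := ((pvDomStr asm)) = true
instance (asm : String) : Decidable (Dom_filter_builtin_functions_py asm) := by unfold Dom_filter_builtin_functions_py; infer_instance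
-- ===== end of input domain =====

-- B replaces A's running skip-flag scan by a group-then-filter pipeline (partition into header blocks, drop builtin blocks); same O(n) cost, different decomposition.


-- ===== PORT A =====
-- A's loop body, step for step: check header, extract name, set/clear skip, append when not skipping.
-- name extraction uses pyGetD with default "": Python's [1]/[0] cannot fail here since '<' occurs in line.
def pvAStep (st : Bool × List String) (line : String) : Bool × List String :=
  if PySem.Str.isIn "<" line && PySem.Str.isIn ">" line
      && PySem.Str.endswith (PySem.Str.strip line) ":" then
    let name := PySem.List.pyGetD
      ((PySem.Str.split? (PySem.List.pyGetD ((PySem.Str.split? line "<").getD []) 1 "") ">").getD []) 0 ""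
    if PySem.Str.endswith name "@plt" || PySem.Str.startswith name "_start"
        || PySem.Str.startswith name "frame_dummy" || PySem.Str.startswith name "register_tm_clones"
        || PySem.Str.startswith name "deregister_tm_clones" || PySem.Str.startswith name "__" then
      (true, st.2)
    else
      (false, st.2 ++ [line])   -- skip = False, then the trailing 'if not skip' appends the line
  else
    if st.1 then st else (st.1, st.2 ++ [line])

def filter_builtin_functions_py (asm : String) : String :=
  PySem.Str.join "\n" ((PySem.Str.splitlines asm).foldl pvAStep (false, [])).2

-- ===== PORT B =====
def pvIsHeader (line : String) : Bool :=
  PySem.Str.isIn "<" line && PySem.Str.isIn ">" line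
    && PySem.Str.endswith (PySem.Str.strip line) ":"

def pvNameOf (header : String) : String :=
  PySem.List.pyGetD
    ((PySem.Str.split? (PySem.List.pyGetD ((PySem.Str.split? header "<").getD []) 1 "") ">").getD []) 0 ""

def pvIsBuiltin (name : String) : Bool :=
  PySem.Str.endswith name "@plt" || PySem.Str.startswith name "_start"
    || PySem.Str.startswith name "frame_dummy" || PySem.Str.startswith name "register_tm_clones"
    || PySem.Str.startswith name "deregister_tm_clones" || PySem.Str.startswith name "__"

-- grouping step: state = (current header?, current body, finished blocks)
def pvGroupStep (st : Option String × List String × List (Option String × List String))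
    (line : String) : Option String × List String × List (Option String × List String) :=
  if pvIsHeader line then (some line, [], st.2.2 ++ [(st.1, st.2.1)])
  else (st.1, st.2.1 ++ [line], st.2.2)

-- emit one block: pre-header block always kept; header blocks dropped when builtin
def pvEmit : Option String × List String → List String
  | (none, body) => body
  | (some h, body) => if pvIsBuiltin (pvNameOf h) then [] else h :: body

def filter_builtin_functions_py_alt (asm : String) : String :=
  let st := (PySem.Str.splitlines asm).foldl pvGroupStep (none, [], [])
  PySem.Str.join "\n" ((st.2.2 ++ [(st.1, st.2.1)]).flatMap pvEmit)

-- ===== PRECONDITION & SPEC =====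
def Spec_filter_builtin_functions_py (asm : String) (out : String) : Prop := out = filter_builtin_functions_py_alt asm
instance (asm : String) (out : String) : Decidable (Spec_filter_builtin_functions_py asm out) := by unfold Spec_filter_builtin_functions_py; infer_instance

-- ===== CLAIM (what is proved, stated in full; the proofs are below) =====
def Claim_equal_filter_builtin_functions_py : Prop := ∀ (asm : String), Dom_filter_builtin_functions_py asm → Spec_filter_builtin_functions_py asm (filter_builtin_functions_py asm)

-- ===== LEMMAS AND PROOFS =====

-- common forward recursion both ports reduce to
def pvGo : Bool → List String → List String
  | _, [] => []
  | skip, l :: rest =>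
    if pvIsHeader l then
      if pvIsBuiltin (pvNameOf l) then pvGo true rest else l :: pvGo false rest
    else if skip then pvGo skip rest else l :: pvGo skip rest

lemma pvAStep_eq (skip : Bool) (acc : List String) (l : String) :
    pvAStep (skip, acc) l =
      if pvIsHeader l then
        (if pvIsBuiltin (pvNameOf l) then (true, acc) else (false, acc ++ [l]))
      else if skip then (skip, acc) else (skip, acc ++ [l]) := rfl

lemma pvA_fold (rest : List String) : ∀ (skip : Bool) (acc : List String),
    (rest.foldl pvAStep (skip, acc)).2 = acc ++ pvGo skip rest := by
  induction rest with
  | nil => intro skip acc; simp [pvGo]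
  | cons l rest ih =>
    intro skip acc
    rw [List.foldl_cons, pvAStep_eq]
    by_cases hh : pvIsHeader l
    · by_cases hb : pvIsBuiltin (pvNameOf l)
      · simp [pvGo, hh, hb, ih]
      · simp [pvGo, hh, hb, ih]
    · cases skip with
      | true => simp [pvGo, hh, ih]
      | false => simp [pvGo, hh, ih]

def pvSkipOf : Option String → Bool
  | none => false
  | some h => pvIsBuiltin (pvNameOf h)

lemma pvB_fold (rest : List String) :
    ∀ (st : Option String × List String × List (Option String × List String)),
    (((rest.foldl pvGroupStep st).2.2 ++ [((rest.foldl pvGroupStep st).1, (rest.foldl pvGroupStep st).2.1)]).flatMap pvEmit)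
      = st.2.2.flatMap pvEmit ++ pvEmit (st.1, st.2.1) ++ pvGo (pvSkipOf st.1) rest := by
  induction rest with
  | nil => intro st; simp [pvGo]
  | cons l rest ih =>
    intro st
    simp only [List.foldl_cons, pvGroupStep, pvGo]
    by_cases hh : pvIsHeader l
    · rw [if_pos hh, if_pos hh, ih]
      by_cases hb : pvIsBuiltin (pvNameOf l)
      · simp [hb, pvEmit, pvSkipOf]
      · simp [hb, pvEmit, pvSkipOf]
    · rw [if_neg hh, if_neg hh, ih]
      cases hst : st.1 with
      | none => simp [pvEmit, pvSkipOf]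
      | some h =>
        by_cases hb : pvIsBuiltin (pvNameOf h)
        · simp [pvEmit, pvSkipOf, hb]
        · simp [pvEmit, pvSkipOf, hb]

-- ===== VERDICT (by name: the statement is the Claim_ definition above) =====
theorem filter_builtin_functions_py_spec : Claim_equal_filter_builtin_functions_py := by
  intro asm _
  show filter_builtin_functions_py asm = filter_builtin_functions_py_alt asm
  simp only [filter_builtin_functions_py, filter_builtin_functions_py_alt]
  rw [pvA_fold, pvB_fold]
  simp [pvEmit, pvSkipOf]
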